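-- pv_equiv track=rewrite | github.com/ozw4/seis_hypo | src/hypo/hypoinverse_cmd.py | _compute_err_erc_insert_idx
-- ===== SOURCE A (Python) =====
-- def cmd_token(line: str) -> str | None:
-- 	s = str(line).strip()
-- 	if not s or s.startswith('*'):
-- 		return None
-- 	return s.split()[0].upper()
--
-- def _is_sal_12(line: str) -> bool:
-- 	s = str(line).strip()
-- 	if not s or s.startswith('*'):
-- 		return False
-- 	parts = s.split()
-- 	if not parts or parts[0].upper() != 'SAL':
-- 		return False
-- 	return len(parts) >= 3 and parts[1] == '1' and parts[2] == '2'
--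
-- def _compute_err_erc_insert_idx(lines: list[str], loc_pos: int) -> int:
-- 	last_phs: int | None = None
-- 	last_sal: int | None = None
-- 	first_fil: int | None = None
--
-- 	for i in range(loc_pos):
-- 		tok = cmd_token(lines[i])
-- 		if tok == 'PHS':
-- 			last_phs = i
-- 		if _is_sal_12(lines[i]):
-- 			last_sal = i
-- 		if tok == 'FIL' and first_fil is None:
-- 			first_fil = i
--
-- 	if last_phs is not None:
-- 		return last_phs + 1
-- 	if last_sal is not None:
-- 		return last_sal + 1
-- 	if first_fil is not None:
-- 		return first_fil
-- 	return loc_pos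
-- ===== SOURCE B (Python) =====
-- def cmd_token(line: str) -> str | None:
-- 	s = str(line).strip()
-- 	if not s or s.startswith('*'):
-- 		return None
-- 	return s.split()[0].upper()
--
-- def _is_sal_12(line: str) -> bool:
-- 	s = str(line).strip()
-- 	if not s or s.startswith('*'):
-- 		return False
-- 	parts = s.split()
-- 	if not parts or parts[0].upper() != 'SAL':
-- 		return False
-- 	return len(parts) >= 3 and parts[1] == '1' and parts[2] == '2'
--
-- def _compute_err_erc_insert_idx(lines: list[str], loc_pos: int) -> int:
-- 	# Three priority-ordered short-circuiting scans instead of one combined pass.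
-- 	for i in reversed(range(loc_pos)):
-- 		if cmd_token(lines[i]) == 'PHS':
-- 			return i + 1
-- 	for i in reversed(range(loc_pos)):
-- 		if _is_sal_12(lines[i]):
-- 			return i + 1
-- 	for i in range(loc_pos):
-- 		if cmd_token(lines[i]) == 'FIL':
-- 			return i
-- 	return loc_pos
-- ===== Notes on version B (the rewrite author's own statement) =====
-- stated objective: alternative
-- what changed: Replaced A's single combined forward pass that maintains three accumulators with three priority-ordered short-circuiting scans: a backward scan for the last PHS line, a backward scan for the last SAL 1 2 line, and a forward scan for the first FIL line, returning at the first hit.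
import Mathlib
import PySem

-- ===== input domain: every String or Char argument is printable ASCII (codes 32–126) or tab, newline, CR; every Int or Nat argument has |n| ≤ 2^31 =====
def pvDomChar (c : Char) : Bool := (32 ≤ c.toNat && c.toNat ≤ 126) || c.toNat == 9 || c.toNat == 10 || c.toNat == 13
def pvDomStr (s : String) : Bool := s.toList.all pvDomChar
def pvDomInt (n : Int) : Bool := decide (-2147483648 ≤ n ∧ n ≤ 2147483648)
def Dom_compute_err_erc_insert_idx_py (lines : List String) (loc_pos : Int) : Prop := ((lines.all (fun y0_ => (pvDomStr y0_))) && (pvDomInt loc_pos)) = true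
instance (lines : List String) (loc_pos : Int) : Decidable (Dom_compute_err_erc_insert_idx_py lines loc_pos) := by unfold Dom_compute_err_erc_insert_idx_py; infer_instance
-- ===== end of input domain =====

-- B replaces A's single combined forward pass by three priority-ordered short-circuiting
-- scans (backward for last PHS, backward for last SAL 1 2, forward for first FIL): 'alternative'.

-- ===== PORT A =====
-- shared helpers (module-level in the Python source, used by both A and B)
def cmdTokenPy (line : String) : Option String :=
  let s := PySem.Str.strip line
  if s = "" || PySem.Str.startswith s "*" then none
  else some (PySem.Str.upper ((PySem.Str.split₀ s).headD ""))

def isSal12Py (line : String) : Bool :=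
  let s := PySem.Str.strip line
  if s = "" || PySem.Str.startswith s "*" then false
  else
    match PySem.Str.split₀ s with
    | [] => false
    | p0 :: rest =>
      if PySem.Str.upper p0 ≠ "SAL" then false
      else
        match rest with
        | p1 :: p2 :: _ => p1 = "1" && p2 = "2"
        | _ => false

-- single pass over range(loc_pos) carrying (last_phs, last_sal, first_fil)
def compute_err_erc_insert_idx_py (lines : List String) (loc_pos : Int) : Int :=
  let st := (List.range loc_pos.toNat).foldl
    (fun (st : Option Nat × Option Nat × Option Nat) i =>
      let l := lines.getD i ""
      let tok := cmdTokenPy l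
      let lastPhs := if tok = some "PHS" then some i else st.1
      let lastSal := if isSal12Py l then some i else st.2.1
      let firstFil := if tok = some "FIL" && st.2.2 = none then some i else st.2.2
      (lastPhs, lastSal, firstFil))
    (none, none, none)
  match st.1 with
  | some i => (i : Int) + 1
  | none =>
    match st.2.1 with
    | some i => (i : Int) + 1
    | none =>
      match st.2.2 with
      | some i => (i : Int)
      | none => loc_pos

-- ===== PORT B =====
-- backward short-circuiting scan: first index below n (checked from n-1 downward) with p
def pvScanBack (p : String → Bool) (lines : List String) : Nat → Option Nat
  | 0 => none
  | n + 1 => if p (lines.getD n "") then some n else pvScanBack p lines n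

def compute_err_erc_insert_idx_py_alt (lines : List String) (loc_pos : Int) : Int :=
  let n := loc_pos.toNat
  match pvScanBack (fun l => cmdTokenPy l = some "PHS") lines n with
  | some i => (i : Int) + 1
  | none =>
    match pvScanBack (fun l => isSal12Py l) lines n with
    | some i => (i : Int) + 1
    | none =>
      -- forward scan with early return = first index in range(n) satisfying the predicate
      match (List.range n).find? (fun i => cmdTokenPy (lines.getD i "") = some "FIL") with
      | some i => (i : Int)
      | none => loc_pos

-- ===== PRECONDITION & SPEC =====
-- Pre_ excludes exactly the inputs where Python A raises IndexError: loc_pos exceeding len(lines).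
def Pre_compute_err_erc_insert_idx_py (lines : List String) (loc_pos : Int) : Prop :=
  loc_pos ≤ (lines.length : Int)
instance (lines : List String) (loc_pos : Int) : Decidable (Pre_compute_err_erc_insert_idx_py lines loc_pos) := by unfold Pre_compute_err_erc_insert_idx_py; infer_instance

def pvWitness_compute_err_erc_insert_idx_py : List String × Int := (["PHS a", "SAL 1 2", "FIL x"], 3)

def Spec_compute_err_erc_insert_idx_py (lines : List String) (loc_pos : Int) (out : Int) : Prop := out = compute_err_erc_insert_idx_py_alt lines loc_pos
instance (lines : List String) (loc_pos : Int) (out : Int) : Decidable (Spec_compute_err_erc_insert_idx_py lines loc_pos out) := by unfold Spec_compute_err_erc_insert_idx_py; infer_instance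

-- ===== CLAIM (what is proved, stated in full; the proofs are below) =====
def Claim_equal_compute_err_erc_insert_idx_py : Prop := ∀ (lines : List String) (loc_pos : Int), Dom_compute_err_erc_insert_idx_py lines loc_pos → Pre_compute_err_erc_insert_idx_py lines loc_pos → Spec_compute_err_erc_insert_idx_py lines loc_pos (compute_err_erc_insert_idx_py lines loc_pos)

-- ===== LEMMAS AND PROOFS =====

theorem pvIfDecide {c : Prop} [Decidable c] (n : Nat) :
    (if c then some n else none) =
      (match decide c with | true => some n | false => none) := by
  by_cases h : c <;> simp [h]

-- A's fold state equals the results of B's three scans.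
set_option maxHeartbeats 2000000 in
theorem pvFold_eq (lines : List String) (n : Nat) :
    (List.range n).foldl
      (fun (st : Option Nat × Option Nat × Option Nat) i =>
        let l := lines.getD i ""
        let tok := cmdTokenPy l
        let lastPhs := if tok = some "PHS" then some i else st.1
        let lastSal := if isSal12Py l then some i else st.2.1
        let firstFil := if tok = some "FIL" && st.2.2 = none then some i else st.2.2
        (lastPhs, lastSal, firstFil))
      (none, none, none)
    = (pvScanBack (fun l => cmdTokenPy l = some "PHS") lines n,
       pvScanBack (fun l => isSal12Py l) lines n,
       (List.range n).find? (fun i => cmdTokenPy (lines.getD i "") = some "FIL")) := by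
  induction n with
  | zero => simp [pvScanBack]
  | succ n ih =>
    rw [List.range_succ, List.foldl_append, ih, List.find?_append]
    clear ih
    simp only [pvScanBack, List.foldl_cons, List.foldl_nil, List.find?,
      List.getD_eq_getElem?_getD]
    cases h : (List.range n).find? (fun i => cmdTokenPy ((lines[i]?).getD "") = some "FIL") with
    | none =>
      simp only [h, Option.orElse, Option.getD]
      by_cases hp : cmdTokenPy ((lines[n]?).getD "") = some "PHS" <;>
        by_cases hs : isSal12Py ((lines[n]?).getD "") <;>
          cases hf : decide (cmdTokenPy ((lines[n]?).getD "") = some "FIL") <;>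
            simp_all <;> (try exact pvIfDecide _)
    | some j =>
      simp only [h, Option.orElse, Option.getD]
      by_cases hp : cmdTokenPy ((lines[n]?).getD "") = some "PHS" <;>
        by_cases hs : isSal12Py ((lines[n]?).getD "") <;> simp_all

-- ===== VERDICT (by name: the statement is the Claim_ definition above) =====
theorem compute_err_erc_insert_idx_py_spec : Claim_equal_compute_err_erc_insert_idx_py := by
  intro lines loc_pos _ _
  unfold Spec_compute_err_erc_insert_idx_py compute_err_erc_insert_idx_py compute_err_erc_insert_idx_py_alt
  rw [pvFold_eq]
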